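-- pv_equiv track=rewrite | github.com/Drashtiie/Data-Structures-and-Algorithm | stack/previous greater element circular.py | nge
-- ===== SOURCE A (Python) =====
-- def nge(l):
--         nums= l
--
--         l=l+l
--         ans=[]
--         s=[]
--         for i in range(len(l)):
--             while len(s)>0 and s[-1] <= l[i]:
--                 s.pop()
--             if len(s)==0:
--                 ans.append(-1)
--             else:
--                 ans.append(s[-1])
--             s.append(l[i])
--
--         return ans[len(nums):]
-- ===== SOURCE B (Python) =====
-- def nge(l):
--     n = len(l)
--     res = []
--     for j in range(n):
--         x = l[j]
--         window = l[:j][::-1] + l[j+1:][::-1]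
--         prev = -1
--         for v in window:
--             if v > x:
--                 prev = v
--                 break
--         res.append(prev)
--     return res
-- ===== Notes on version B (the rewrite author's own statement) =====
-- stated objective: simpler
-- what changed: Replaces the doubled-array monotonic-stack pass with a direct per-element backward circular scan (reversed prefix then reversed suffix) taking the first strictly greater value.
import Mathlib
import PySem

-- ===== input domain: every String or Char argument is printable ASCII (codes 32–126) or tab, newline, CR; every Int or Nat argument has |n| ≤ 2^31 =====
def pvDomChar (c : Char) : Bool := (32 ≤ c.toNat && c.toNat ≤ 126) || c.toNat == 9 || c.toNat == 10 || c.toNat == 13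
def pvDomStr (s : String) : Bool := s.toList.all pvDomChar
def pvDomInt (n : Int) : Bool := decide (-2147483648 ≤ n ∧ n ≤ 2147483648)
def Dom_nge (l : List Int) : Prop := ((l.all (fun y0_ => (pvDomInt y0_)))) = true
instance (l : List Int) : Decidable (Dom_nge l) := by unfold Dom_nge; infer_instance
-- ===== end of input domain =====

-- B replaces A's doubled-array monotonic-stack pass with a direct per-element
-- backward circular scan; objective: simpler (no asymptotic or speed claim).

-- ===== PORT A =====
-- the inner `while` loop: pop stack entries (top = head) that are <= x
def popWhile (x : Int) : List Int → List Int
  | [] => []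
  | h :: t => if h ≤ x then popWhile x t else h :: t

-- one iteration of A's `for` loop; state = (ans, s), stack top at head
def stepA (st : List Int × List Int) (x : Int) : List Int × List Int :=
  let s := popWhile x st.2
  (st.1 ++ [if s.isEmpty then -1 else s.headD 0], x :: s)

def nge (l : List Int) : List Int :=
  let l2 := l ++ l                 -- l = l + l
  let r := l2.foldl stepA ([], []) -- for i in range(len(l)): ...
  r.1.drop l.length                -- ans[len(nums):]

-- ===== PORT B =====
-- B's inner loop: prev = -1; first v in window with v > x
def scanWin (x : Int) : List Int → Int
  | [] => -1
  | v :: vs => if x < v then v else scanWin x vs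

def nge_alt (l : List Int) : List Int :=
  -- for j in range(n): x = l[j] (j is in range, so getD is exact);
  -- window = l[:j][::-1] + l[j+1:][::-1]  (0 ≤ j < n, so take/drop are exact)
  (List.range l.length).map (fun j =>
    let x := l.getD j 0
    scanWin x ((l.take j).reverse ++ (l.drop (j + 1)).reverse))

-- ===== PRECONDITION & SPEC =====
def Spec_nge (l : List Int) (out : List Int) : Prop := out = nge_alt l
instance (l : List Int) (out : List Int) : Decidable (Spec_nge l out) := by unfold Spec_nge; infer_instance

-- ===== CLAIM =====
def Claim_equal_nge : Prop := ∀ (l : List Int), Dom_nge l → Spec_nge l (nge l)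

-- ===== LEMMAS AND PROOFS =====
-- the stack after processing prefix p
def stackOf (p : List Int) : List Int := p.foldl (fun s x => x :: popWhile x s) []

-- previous-greater value of x relative to prefix p (scan p backwards)
def pg (p : List Int) (x : Int) : Int := (p.reverse.find? (fun v => x < v)).getD (-1)

-- answers A produces while scanning ys after prefix p
def ansFor (p : List Int) : List Int → List Int
  | [] => []
  | y :: ys => pg p y :: ansFor (p ++ [y]) ys

theorem popWhile_popWhile (x y : Int) (h : y ≤ x) (s : List Int) :
    popWhile x (popWhile y s) = popWhile x s := by
  induction s with
  | nil => rfl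
  | cons a t ih =>
    simp only [popWhile]
    by_cases ha : a ≤ y
    · simp [ha, le_trans ha h, ih]
    · simp [popWhile, ha]

theorem stackOf_append (p : List Int) (y : Int) :
    stackOf (p ++ [y]) = y :: popWhile y (stackOf p) := by
  simp [stackOf]

theorem head?_popWhile_stackOf (p : List Int) (x : Int) :
    (popWhile x (stackOf p)).head? = p.reverse.find? (fun v => x < v) := by
  induction p using List.reverseRecOn with
  | nil => simp [stackOf, popWhile]
  | append_singleton p y ih =>
    rw [stackOf_append]
    simp only [popWhile, List.reverse_append, List.reverse_singleton,
      List.singleton_append, List.find?_cons]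
    by_cases h : y ≤ x
    · have : ¬ x < y := not_lt.mpr h
      simp [h, this, popWhile_popWhile x y h, ih]
    · simp [h, lt_of_not_ge h]

theorem ansOf_eq (s : List Int) :
    (if s.isEmpty then (-1 : Int) else s.headD 0) = s.head?.getD (-1) := by
  cases s <;> simp

theorem foldl_stepA (ys p ans0 : List Int) :
    ys.foldl stepA (ans0, stackOf p) = (ans0 ++ ansFor p ys, stackOf (p ++ ys)) := by
  induction ys generalizing p ans0 with
  | nil => simp [ansFor]
  | cons y ys ih =>
    have hstep : stepA (ans0, stackOf p) y = (ans0 ++ [pg p y], stackOf (p ++ [y])) := by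
      simp only [stepA, stackOf_append, ansOf_eq, head?_popWhile_stackOf]
      simp [pg]
    simp only [List.foldl_cons, hstep, ih (p ++ [y]) (ans0 ++ [pg p y]), ansFor]
    simp
theorem ansFor_append (ys zs p : List Int) :
    ansFor p (ys ++ zs) = ansFor p ys ++ ansFor (p ++ ys) zs := by
  induction ys generalizing p with
  | nil => simp [ansFor]
  | cons y ys ih => simp [ansFor, ih]

theorem length_ansFor (ys p : List Int) : (ansFor p ys).length = ys.length := by
  induction ys generalizing p with
  | nil => rfl
  | cons y ys ih => simp [ansFor, ih]

theorem getElem_ansFor (ys p : List Int) (j : Nat) (hj : j < ys.length) :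
    (ansFor p ys)[j]'(by rw [length_ansFor]; exact hj) = pg (p ++ ys.take j) ys[j] := by
  induction ys generalizing p j with
  | nil => simp at hj
  | cons y ys ih =>
    cases j with
    | zero => simp [ansFor]
    | succ j =>
      simp only [ansFor, List.getElem_cons_succ, List.take_succ_cons]
      rw [ih (p ++ [y]) j (by simpa using hj)]
      simp

theorem scanWin_eq_find? (x : Int) (w : List Int) :
    scanWin x w = (w.find? (fun v => x < v)).getD (-1) := by
  induction w with
  | nil => rfl
  | cons v vs ih =>
    simp only [scanWin, List.find?_cons]
    by_cases h : x < v <;> simp [h, ih]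

theorem pg_circular (l : List Int) (j : Nat) (hj : j < l.length) :
    pg (l ++ l.take j) l[j] =
      (((l.take j).reverse ++ (l.drop (j + 1)).reverse).find?
        (fun v => l[j] < v)).getD (-1) := by
  have hsplit : l.reverse = (l.drop (j + 1)).reverse ++ (l.take (j + 1)).reverse := by
    rw [← List.reverse_append, List.take_append_drop]
  have htake : l.take (j + 1) = l.take j ++ [l[j]] := by
    rw [List.take_succ]
    simp [List.getElem?_eq_getElem hj]
  unfold pg
  rw [List.reverse_append, hsplit, List.find?_append, List.find?_append]
  -- if the first two segments find nothing, the third finds nothing either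
  rcases h1 : ((l.take j).reverse.find? (fun v => l[j] < v)) with _ | v
  · rcases h2 : ((l.drop (j + 1)).reverse.find? (fun v => l[j] < v)) with _ | v
    · have h3 : ((l.take (j + 1)).reverse.find? (fun v => l[j] < v)) = none := by
        rw [List.find?_eq_none] at h1 ⊢
        intro v hv
        rw [htake] at hv
        simp only [List.reverse_append, List.reverse_singleton, List.mem_append,
          List.mem_singleton, List.mem_reverse] at hv
        rcases hv with hv | hv
        · simp [hv]
        · exact h1 v (by simpa using hv)
      simp [h1, h2, h3]
    · simp [h1, h2]
  · simp [h1]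

theorem nge_eq_ansFor (l : List Int) : nge l = ansFor l l := by
  have h0 : stackOf ([] : List Int) = [] := rfl
  have := foldl_stepA (l ++ l) [] []
  rw [h0] at this
  simp only [nge, this]
  rw [ansFor_append, List.nil_append]
  rw [List.drop_append_of_le_length (by rw [length_ansFor])]
  rw [show l.length = (ansFor [] l).length from (length_ansFor l []).symm]
  simp

-- ===== VERDICT =====
theorem nge_spec : Claim_equal_nge := by
  intro l _
  unfold Spec_nge
  rw [nge_eq_ansFor]
  unfold nge_alt
  apply List.ext_getElem
  · simp [length_ansFor]
  · intro j hj hj'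
    have hjl : j < l.length := by simpa [length_ansFor] using hj
    rw [getElem_ansFor l l j hjl]
    simp only [List.getElem_map, List.getElem_range]
    rw [pg_circular l j hjl, scanWin_eq_find?]
    congr 1
    simp [List.getD, List.getElem?_eq_getElem hjl]
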